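-- pv_equiv track=rewrite | github.com/linhdvu14/cp-sols | sols/Google/KickStart/2022/2022_D/D_Suspects_and_Witnesses.py | solve
-- ===== SOURCE A (Python) =====
-- def solve(N, M, K, edges):
--     adj = [[] for _ in range(N)]
--     for u, v in edges:  # reverse edge
--         adj[v-1].append(u-1)
--
--     # if num unique v reachable from u > K, then u must be innocent
--     def is_ok(u):
--         seen = set([u])
--         stack = [u]
--         while stack:
--             if len(seen) > K: return True
--             u = stack.pop()
--             for v in adj[u]:
--                 if v in seen: continue
--                 seen.add(v)
--                 stack.append(v)
--         return False
--
--     res = sum(1 for u in range(N) if is_ok(u))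
--     return res
-- ===== SOURCE B (Python) =====
-- def solve(N, M, K, edges):
--     # one all-pairs closure instead of N independent DFS runs: Bellman-Ford-style
--     # rounds relax every edge over per-node sets of (transitive) reverse-neighbours,
--     # then a single counting pass (the node itself joins its set only when counting)
--     pred = [set() for _ in range(N)]
--     for _ in range(N):
--         for u, v in edges:
--             pred[v-1] |= pred[u-1] | {u-1}
--     return sum(1 for i in range(N) if len(pred[i] | {i}) > K)
-- ===== Notes on version B (the rewrite author's own statement) =====
-- stated objective: alternative
-- what changed: Replaces the N independent per-source DFS searches (explicit stack, early exit) by one all-pairs closure: Bellman-Ford-style rounds that relax every edge over per-node sets of transitive reverse-neighbours, followed by a single counting pass; Pre_ restricts edge endpoints to [1-N, N] (the labels Python list indexing accepts for N nodes), because outside it A can still return via its early length check while B's per-edge relaxation always indexes both endpoints and raises IndexError.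
-- outside the precondition, e.g. on solve(2, 1, -1, [(5, 1)]): A returns 2, B raises IndexError
import Mathlib
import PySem

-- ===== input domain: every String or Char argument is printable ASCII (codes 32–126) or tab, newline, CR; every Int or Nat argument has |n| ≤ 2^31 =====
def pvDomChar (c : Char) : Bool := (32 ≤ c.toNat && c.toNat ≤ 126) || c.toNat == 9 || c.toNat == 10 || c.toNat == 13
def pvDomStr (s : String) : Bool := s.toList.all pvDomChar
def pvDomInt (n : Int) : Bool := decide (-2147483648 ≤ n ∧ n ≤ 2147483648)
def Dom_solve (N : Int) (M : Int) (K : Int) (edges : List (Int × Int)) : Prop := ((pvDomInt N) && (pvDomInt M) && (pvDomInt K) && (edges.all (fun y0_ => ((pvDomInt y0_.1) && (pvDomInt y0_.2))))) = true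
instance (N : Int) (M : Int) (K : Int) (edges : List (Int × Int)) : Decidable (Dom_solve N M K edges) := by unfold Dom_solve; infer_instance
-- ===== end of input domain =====

-- B replaces A's N independent DFS searches by one all-pairs closure (rounds of edge
-- relaxation over per-node sets of transitive reverse-neighbours) plus a counting pass ("alternative").

-- ===== PORT A =====
-- adj[v-1].append(u-1)  (a None from pyIdx? is Python's IndexError; excluded by Pre_solve)
def adjStepF (adj : List (List Int)) (e : Int × Int) : List (List Int) :=
  match PySem.List.pyIdx? adj.length (e.2 - 1) with
  | some j => adj.set j ((adj.getD j []) ++ [e.1 - 1])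
  | none => adj

-- adj = [[] for _ in range(N)]; for u, v in edges: adj[v-1].append(u-1)
def buildAdj (N : Int) (edges : List (Int × Int)) : List (List Int) :=
  edges.foldl adjStepF ((PySem.List.pyRange 0 N 1).map (fun _ => []))

-- the elements the inner `for v in adj[u]` loop appends (in order); used by the
-- termination proof of dfsLoop, which cites the lemmas below by name
def newElems (seen : List Int) (nbrs : List Int) : List Int :=
  match nbrs with
  | [] => []
  | v :: t => if v ∈ seen then newElems seen t else v :: newElems (seen ++ [v]) t

theorem newElems_sub : ∀ (nbrs seen : List Int) (x : Int),
    x ∈ newElems seen nbrs → x ∈ nbrs ∧ x ∉ seen := by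
  intro nbrs
  induction nbrs with
  | nil => intro seen x hx; simp [newElems] at hx
  | cons v t ih =>
    intro seen x hx
    by_cases hv : v ∈ seen
    · simp only [newElems, if_pos hv] at hx
      rcases ih seen x hx with ⟨h1, h2⟩
      exact ⟨List.mem_cons_of_mem _ h1, h2⟩
    · simp only [newElems, if_neg hv, List.mem_cons] at hx
      rcases hx with rfl | hx
      · exact ⟨List.mem_cons_self, hv⟩
      · rcases ih (seen ++ [v]) x hx with ⟨h1, h2⟩
        simp only [List.mem_append, List.mem_singleton, not_or] at h2
        exact ⟨List.mem_cons_of_mem _ h1, h2.1⟩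

theorem newElems_nodup : ∀ (nbrs seen : List Int), (newElems seen nbrs).Nodup := by
  intro nbrs
  induction nbrs with
  | nil => intro seen; simp [newElems]
  | cons v t ih =>
    intro seen
    by_cases hv : v ∈ seen
    · simpa [newElems, if_pos hv] using ih seen
    · simp only [newElems, if_neg hv, List.nodup_cons]
      refine ⟨fun hmem => ?_, ih (seen ++ [v])⟩
      rcases newElems_sub t (seen ++ [v]) v hmem with ⟨_, h2⟩
      exact h2 (by simp)

theorem dfsPush_eq : ∀ (nbrs seen stack : List Int),
    nbrs.foldl (fun (p : PySem.Set Int × List Int) v =>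
        if PySem.Set.contains p.1 v then p else (PySem.Set.add p.1 v, p.2 ++ [v])) (seen, stack)
      = (seen ++ newElems seen nbrs, stack ++ newElems seen nbrs) := by
  intro nbrs
  induction nbrs with
  | nil => intro seen stack; simp [newElems]
  | cons v t ih =>
    intro seen stack
    by_cases hv : v ∈ seen
    · have hc : PySem.Set.contains seen v = true := by
        simpa [PySem.Set.contains] using hv
      simp only [List.foldl_cons, hc, newElems, if_pos hv]
      exact ih seen stack
    · have hc : PySem.Set.contains seen v = false := by
        simp [PySem.Set.contains]; exact hv
      have hadd : PySem.Set.add seen v = seen ++ [v] := by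
        simp [PySem.Set.add, PySem.Set.contains, hv]
      simp only [List.foldl_cons, hc, Bool.false_eq_true, if_false, hadd, newElems, if_neg hv]
      rw [ih (seen ++ [v]) (stack ++ [v])]
      simp [List.append_assoc]

def unseen (D seen : List Int) : Nat := D.countP (fun x => decide (x ∉ seen))

theorem unseen_split (D seen nl : List Int) (hD : D.Nodup) (hnl : nl.Nodup)
    (hsub : ∀ x ∈ nl, x ∈ D ∧ x ∉ seen) :
    unseen D seen = unseen D (seen ++ nl) + nl.length := by
  have hA : ∀ (E : List Int), E.countP (fun x => decide (x ∉ seen))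
      = E.countP (fun x => decide (x ∉ seen ++ nl)) + E.countP (fun x => decide (x ∈ nl)) := by
    intro E
    induction E with
    | nil => simp
    | cons a E ihE =>
      rw [List.countP_cons, List.countP_cons, List.countP_cons, ihE]
      by_cases ha : a ∈ nl
      · have h1 : a ∉ seen := (hsub a ha).2
        have h2 : a ∈ seen ++ nl := List.mem_append.mpr (Or.inr ha)
        simp [h1, h2, ha]; omega
      · by_cases hs : a ∈ seen
        · have h2 : a ∈ seen ++ nl := List.mem_append.mpr (Or.inl hs)
          simp [hs, h2, ha]
        · have h2 : a ∉ seen ++ nl := by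
            simp [List.mem_append, hs, ha]
          simp [hs, h2, ha]
          omega
  have hB : D.countP (fun x => decide (x ∈ nl)) = nl.length := by
    rw [List.countP_eq_length_filter]
    have hfn : (D.filter (fun x => decide (x ∈ nl))).Nodup := hD.filter _
    have hset : (D.filter (fun x => decide (x ∈ nl))).toFinset = nl.toFinset := by
      ext x
      simp only [List.mem_toFinset, List.mem_filter, decide_eq_true_eq]
      exact ⟨fun h => h.2, fun h => ⟨(hsub x h).1, h⟩⟩
    have h1 := List.toFinset_card_of_nodup hfn
    have h2 := List.toFinset_card_of_nodup hnl
    rw [hset] at h1; omega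
  unfold unseen
  rw [hA D, hB]

-- def is_ok(u): the while loop, transliterated (seen : set; stack : list; pop from the end)
def dfsLoop (adj : List (List Int)) (K : Int) (seen : PySem.Set Int) (stack : List Int) : Bool :=
  match stack with
  | [] => false
  | a :: rest =>
    if PySem.Set.len seen > K then true
    else
      let u := (a :: rest).getLast (List.cons_ne_nil a rest)
      let stack' := (a :: rest).dropLast
      let nbrs := (PySem.List.pyGet? adj u).getD []
      let p := nbrs.foldl (fun (p : PySem.Set Int × List Int) v =>
        if PySem.Set.contains p.1 v then p else (PySem.Set.add p.1 v, p.2 ++ [v])) (seen, stack')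
      dfsLoop adj K p.1 p.2
termination_by unseen (PySem.List.dedup adj.flatten) seen * 2 + stack.length
decreasing_by
  have hp : p = (seen ++ newElems seen nbrs, stack' ++ newElems seen nbrs) := by
    simp only [p, dite_eq_ite]
    exact dfsPush_eq nbrs seen stack'
  have hD : (PySem.List.dedup adj.flatten).Nodup := PySem.List.nodup_dedup _
  have hsub : ∀ x ∈ newElems seen nbrs, x ∈ PySem.List.dedup adj.flatten ∧ x ∉ seen := by
    intro x hx
    rcases newElems_sub nbrs seen x hx with ⟨h1, h2⟩
    refine ⟨?_, h2⟩
    have h1' : x ∈ (PySem.List.pyGet? adj u).getD [] := h1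
    have : x ∈ adj.flatten := by
      cases hg : PySem.List.pyGet? adj u with
      | none => rw [hg] at h1'; simp at h1'
      | some l =>
        rw [hg] at h1'; simp at h1'
        exact List.mem_flatten.mpr ⟨l, PySem.List.mem_of_pyGet?_eq_some adj hg, h1'⟩
    simpa [PySem.List.mem_dedup] using this
  have hspl := unseen_split (PySem.List.dedup adj.flatten) seen (newElems seen nbrs) hD
    (newElems_nodup nbrs seen) hsub
  have hlen : stack'.length + 1 = (a :: rest).length := by simp [stack']
  show unseen (PySem.List.dedup adj.flatten) p.1 * 2 + p.2.length <
       unseen (PySem.List.dedup adj.flatten) seen * 2 + (a :: rest).length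
  rw [hp]
  simp only [List.length_append]
  omega

-- res = sum(1 for u in range(N) if is_ok(u))
def solve (N : Int) (M : Int) (K : Int) (edges : List (Int × Int)) : Int :=
  let adj := buildAdj N edges
  (PySem.List.pyRange 0 N 1).foldl
    (fun acc u => if dfsLoop adj K (PySem.Set.ofList [u]) [u] then acc + 1 else acc) 0

-- ===== PORT B =====
-- pred[v-1] |= pred[u-1] | {u-1}  (an out-of-range index is Python's IndexError; excluded by Pre_solve)
def altUpd (pred : List (PySem.Set Int)) (e : Int × Int) : List (PySem.Set Int) :=
  match PySem.List.pyGet? pred (e.1 - 1), PySem.List.pyIdx? pred.length (e.2 - 1) with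
  | some ru, some j =>
      pred.set j (PySem.Set.union (pred.getD j []) (PySem.Set.union ru (PySem.Set.ofList [e.1 - 1])))
  | _, _ => pred

def solve_alt (N : Int) (M : Int) (K : Int) (edges : List (Int × Int)) : Int :=
  -- pred = [set() for _ in range(N)]; N rounds of: for u, v in edges: pred[v-1] |= pred[u-1] | {u-1}
  let pred := (PySem.List.pyRange 0 N 1).foldl (fun p _ => edges.foldl altUpd p)
    ((PySem.List.pyRange 0 N 1).map (fun _ => PySem.Set.empty))
  -- return sum(1 for i in range(N) if len(pred[i] | {i}) > K)
  (PySem.List.pyRange 0 N 1).foldl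
    (fun acc i =>
      if PySem.Set.len (PySem.Set.union ((PySem.List.pyGet? pred i).getD []) (PySem.Set.ofList [i])) > K
      then acc + 1 else acc) 0

-- ===== PRECONDITION & SPEC =====
-- Pre_solve restricts edge endpoints to [1-N, N], the labels Python list indexing accepts for N
-- nodes: outside it A raises IndexError, or returns only via its early length check where B's
-- per-edge relaxation (which always indexes both endpoints) raises IndexError.
def Pre_solve (N : Int) (M : Int) (K : Int) (edges : List (Int × Int)) : Prop :=
  ∀ e ∈ edges, 1 - N ≤ e.1 ∧ e.1 ≤ N ∧ 1 - N ≤ e.2 ∧ e.2 ≤ N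
instance (N : Int) (M : Int) (K : Int) (edges : List (Int × Int)) : Decidable (Pre_solve N M K edges) := by unfold Pre_solve; infer_instance

def pvWitness_solve : Int × Int × Int × (List (Int × Int)) := (3, 2, 1, [(1, 2), (2, 3)])

def Spec_solve (N : Int) (M : Int) (K : Int) (edges : List (Int × Int)) (out : Int) : Prop := out = solve_alt N M K edges
instance (N : Int) (M : Int) (K : Int) (edges : List (Int × Int)) (out : Int) : Decidable (Spec_solve N M K edges out) := by unfold Spec_solve; infer_instance

-- ===== CLAIM (what is proved, stated in full; the proofs are below) =====
def Claim_equal_solve : Prop := ∀ (N : Int) (M : Int) (K : Int) (edges : List (Int × Int)), Dom_solve N M K edges → Pre_solve N M K edges → Spec_solve N M K edges (solve N M K edges)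

-- ===== LEMMAS AND PROOFS =====

theorem newElems_app_nodup : ∀ (nbrs seen : List Int), seen.Nodup →
    (seen ++ newElems seen nbrs).Nodup := by
  intro nbrs
  induction nbrs with
  | nil => intro seen h; simpa [newElems]
  | cons v t ih =>
    intro seen h
    by_cases hv : v ∈ seen
    · simpa [newElems, if_pos hv] using ih seen h
    · have h' : (seen ++ [v]).Nodup := by
        refine List.Nodup.append h (List.nodup_singleton v) ?_
        intro a ha hb
        simp only [List.mem_singleton] at hb
        subst hb; exact hv ha
      have h2 := ih (seen ++ [v]) h'
      rw [List.append_assoc] at h2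
      simpa [newElems, if_neg hv] using h2

theorem newElems_cover : ∀ (nbrs seen : List Int) (y : Int), y ∈ nbrs →
    y ∈ seen ++ newElems seen nbrs := by
  intro nbrs
  induction nbrs with
  | nil => intro seen y hy; simp at hy
  | cons v t ih =>
    intro seen y hy
    rcases List.mem_cons.mp hy with rfl | hy
    · by_cases hv : y ∈ seen
      · simp [newElems, hv]
      · simp [newElems, if_neg hv]
    · by_cases hv : v ∈ seen
      · simpa [newElems, if_pos hv] using ih seen y hy
      · have h2 := ih (seen ++ [v]) y hy
        rw [List.append_assoc] at h2
        simpa [newElems, if_neg hv] using h2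

-- ---------- facts about Python index normalisation ----------

theorem pyIdx?_lt (n : Nat) (i : Int) (j : Nat) (h : PySem.List.pyIdx? n i = some j) : j < n := by
  unfold PySem.List.pyIdx? at h
  by_cases h0 : (0:Int) ≤ i
  · rw [if_pos h0] at h
    by_cases h1 : i < (n:Int)
    · rw [if_pos h1] at h
      cases h; omega
    · rw [if_neg h1] at h; cases h
  · rw [if_neg h0] at h
    by_cases h1 : -(n:Int) ≤ i
    · rw [if_pos h1] at h
      cases h; omega
    · rw [if_neg h1] at h; cases h

theorem pyIdx?_canon (n j : Nat) (h : j < n) : PySem.List.pyIdx? n (j : Int) = some j := by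
  unfold PySem.List.pyIdx?
  rw [if_pos (by omega), if_pos (by omega)]
  simp

theorem pyIdx?_some_of (n : Nat) (i : Int) (h0 : -(n:Int) ≤ i) (h1 : i < n) :
    ∃ j : Nat, PySem.List.pyIdx? n i = some j := by
  unfold PySem.List.pyIdx?
  by_cases hi : (0:Int) ≤ i
  · exact ⟨i.toNat, by rw [if_pos hi, if_pos h1]⟩
  · exact ⟨n - (-i).toNat, by rw [if_neg hi, if_pos h0]⟩

-- ---------- the step relation both programs walk (raw labels, Python index wraparound) ----------

def StepR (N : Int) (edges : List (Int × Int)) (x y : Int) : Prop :=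
  ∃ e ∈ edges, y = e.1 - 1 ∧ (PySem.List.pyIdx? N.toNat (e.2 - 1)).isSome ∧
    PySem.List.pyIdx? N.toNat (e.2 - 1) = PySem.List.pyIdx? N.toNat x

def ClR (N : Int) (edges : List (Int × Int)) (s : Int) : Set Int :=
  {x | Relation.ReflTransGen (StepR N edges) s x}

def TClR (N : Int) (edges : List (Int × Int)) (s : Int) : Set Int :=
  {x | Relation.TransGen (StepR N edges) s x}

theorem stepR_congr (N : Int) (edges : List (Int × Int)) (x x' y : Int)
    (hc : PySem.List.pyIdx? N.toNat x = PySem.List.pyIdx? N.toNat x')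
    (h : StepR N edges x y) : StepR N edges x' y := by
  rcases h with ⟨e, he, hy, hs, heq⟩
  exact ⟨e, he, hy, hs, heq.trans hc⟩

theorem transGen_shift {r : Int → Int → Prop} {a b x : Int}
    (hshift : ∀ z, r a z → r b z) (h : Relation.TransGen r a x) : Relation.TransGen r b x := by
  induction h with
  | single h => exact Relation.TransGen.single (hshift _ h)
  | tail _ hstep ih => exact Relation.TransGen.tail ih hstep

-- ---------- A side: the built adjacency realises StepR ----------

theorem solve_eq_countP (N M K : Int) (edges : List (Int × Int)) :
    solve N M K edges = ((PySem.List.pyRange 0 N 1).countP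
      (fun u => dfsLoop (buildAdj N edges) K (PySem.Set.ofList [u]) [u]) : Int) := by
  show (PySem.List.pyRange 0 N 1).foldl
      (fun acc u => if dfsLoop (buildAdj N edges) K (PySem.Set.ofList [u]) [u] then acc + 1 else acc) 0 = _
  rw [PySem.List.foldl_if_add_one]
  exact zero_add _

theorem length_adjStepF (adj : List (List Int)) (e : Int × Int) :
    (adjStepF adj e).length = adj.length := by
  unfold adjStepF
  cases PySem.List.pyIdx? adj.length (e.2 - 1) with
  | none => rfl
  | some j => exact List.length_set ..

theorem getD_foldl_adjStepF : ∀ (es : List (Int × Int)) (init : List (List Int)) (j : Nat),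
    (es.foldl adjStepF init).getD j [] = init.getD j [] ++
      (es.filter (fun e => PySem.List.pyIdx? init.length (e.2 - 1) == some j)).map (fun e => e.1 - 1) := by
  intro es
  induction es with
  | nil => intro init j; simp
  | cons e es ih =>
    intro init j
    rw [List.foldl_cons, List.filter_cons]
    cases hidx : PySem.List.pyIdx? init.length (e.2 - 1) with
    | none =>
      have hstep : adjStepF init e = init := by unfold adjStepF; rw [hidx]
      rw [hstep, ih init j]
      simp
    | some j0 =>
      have hj0 : j0 < init.length := pyIdx?_lt _ _ _ hidx
      have hstep : adjStepF init e = init.set j0 ((init.getD j0 []) ++ [e.1 - 1]) := by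
        unfold adjStepF; rw [hidx]
      rw [hstep, ih _ j, List.length_set]
      by_cases hj : j0 = j
      · subst hj
        have hset : (init.set j0 ((init.getD j0 []) ++ [e.1 - 1])).getD j0 []
            = init.getD j0 [] ++ [e.1 - 1] := by
          rw [List.getD_eq_getElem?_getD, List.getElem?_set_self (by omega), Option.getD_some]
        rw [hset]
        simp only [beq_self_eq_true, if_true, List.map_cons]
        rw [List.append_assoc]
        rfl
      · have hset : (init.set j0 ((init.getD j0 []) ++ [e.1 - 1])).getD j []
            = init.getD j [] := by
          rw [List.getD_eq_getElem?_getD, List.getElem?_set_ne hj, ← List.getD_eq_getElem?_getD]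
        rw [hset]
        have : ((some j0 == some j) : Bool) = false := by
          simp [hj]
        rw [this]
        rfl

theorem length_buildAdj (N : Int) (edges : List (Int × Int)) :
    (buildAdj N edges).length = N.toNat := by
  unfold buildAdj
  have : ∀ (es : List (Int × Int)) (init : List (List Int)),
      (es.foldl adjStepF init).length = init.length := by
    intro es
    induction es with
    | nil => intro init; rfl
    | cons e es ih => intro init; rw [List.foldl_cons, ih, length_adjStepF]
  rw [this]
  simp [PySem.List.length_pyRange_one]

theorem mem_buildAdj (N : Int) (edges : List (Int × Int))
    (u y : Int) (hu : -N ≤ u) (huN : u < N) :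
    (y ∈ (PySem.List.pyGet? (buildAdj N edges) u).getD []) ↔ StepR N edges u y := by
  have hN : 1 ≤ N := by omega
  have hlen := length_buildAdj N edges
  obtain ⟨ju, hju⟩ : ∃ j : Nat, PySem.List.pyIdx? N.toNat u = some j :=
    pyIdx?_some_of N.toNat u (by omega) (by omega)
  have hjuLt : ju < N.toNat := pyIdx?_lt _ _ _ hju
  have hget : PySem.List.pyGet? (buildAdj N edges) u = some ((buildAdj N edges).getD ju []) := by
    unfold PySem.List.pyGet?
    rw [hlen, hju, Option.bind_some]
    rw [List.getElem?_eq_getElem (by omega)]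
    rw [List.getD_eq_getElem?_getD, List.getElem?_eq_getElem (by omega), Option.getD_some]
  rw [hget, Option.getD_some]
  have hinit : ∀ (j : Nat), (((PySem.List.pyRange 0 N 1).map (fun _ => ([] : List Int)))).getD j [] = [] := by
    intro j
    rw [List.getD_eq_getElem?_getD, List.getElem?_map]
    cases (PySem.List.pyRange 0 N 1)[j]? <;> simp
  have hval : (buildAdj N edges).getD ju [] =
      (edges.filter (fun e => PySem.List.pyIdx? N.toNat (e.2 - 1) == some ju)).map (fun e => e.1 - 1) := by
    unfold buildAdj
    rw [getD_foldl_adjStepF edges _ ju]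
    have hlen2 : ((PySem.List.pyRange 0 N 1).map (fun _ => ([] : List Int))).length = N.toNat := by
      simp [PySem.List.length_pyRange_one]
    rw [hlen2, hinit, List.nil_append]
  rw [hval]
  constructor
  · intro hy
    rcases List.mem_map.mp hy with ⟨e, hef, hey⟩
    rcases List.mem_filter.mp hef with ⟨he, hcond⟩
    rw [beq_iff_eq] at hcond
    exact ⟨e, he, hey.symm, by rw [hcond]; rfl, by rw [hcond, hju]⟩
  · rintro ⟨e, he, rfl, _, heq⟩
    refine List.mem_map.mpr ⟨e, List.mem_filter.mpr ⟨he, ?_⟩, rfl⟩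
    rw [beq_iff_eq, heq, hju]

theorem clR_range (N : Int) (edges : List (Int × Int))
    (hPre : ∀ e ∈ edges, 1 - N ≤ e.1 ∧ e.1 ≤ N ∧ 1 - N ≤ e.2 ∧ e.2 ≤ N)
    (s : Int) (hs0 : -N ≤ s) (hsN : s < N) :
    ∀ x ∈ ClR N edges s, -N ≤ x ∧ x < N := by
  intro x hx
  induction hx with
  | refl => exact ⟨hs0, hsN⟩
  | tail _ hstep _ =>
    rcases hstep with ⟨e, he, hy, _, _⟩
    rcases hPre e he with ⟨h1, h2, _, _⟩
    omega

theorem clR_finite (N : Int) (edges : List (Int × Int))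
    (hPre : ∀ e ∈ edges, 1 - N ≤ e.1 ∧ e.1 ≤ N ∧ 1 - N ≤ e.2 ∧ e.2 ≤ N)
    (s : Int) (hs0 : -N ≤ s) (hsN : s < N) : (ClR N edges s).Finite := by
  refine Set.Finite.subset (Finset.Ico (-N) N).finite_toSet ?_
  intro x hx
  rcases clR_range N edges hPre s hs0 hsN x hx with ⟨h1, h2⟩
  simp only [Finset.coe_Ico, Set.mem_Ico]
  exact ⟨h1, h2⟩

-- the invariant maintained by the DFS loop
structure DfsInv (N : Int) (edges : List (Int × Int)) (K : Int) (s : Int)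
    (seen stack : List Int) : Prop where
  ndSeen : seen.Nodup
  ndStack : stack.Nodup
  sub : ∀ x ∈ stack, x ∈ seen
  rng : ∀ x ∈ seen, -N ≤ x ∧ x < N
  snd : ∀ x ∈ seen, x ∈ ClR N edges s
  closed : ∀ x ∈ seen, x ∉ stack → ∀ y, StepR N edges x y → y ∈ seen
  start : s ∈ seen
  emptyB : stack = [] → (seen.length : Int) ≤ K

theorem seen_len_le_ncard (N : Int) (edges : List (Int × Int)) (s : Int) (seen : List Int)
    (hfin : (ClR N edges s).Finite) (nd : seen.Nodup) (hsub : ∀ x ∈ seen, x ∈ ClR N edges s) :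
    seen.length ≤ (ClR N edges s).ncard := by
  have hsubF : ↑seen.toFinset ⊆ ClR N edges s := fun x hx => hsub x (List.mem_toFinset.mp hx)
  calc seen.length = seen.toFinset.card := (List.toFinset_card_of_nodup nd).symm
    _ = (↑seen.toFinset : Set Int).ncard := (Set.ncard_coe_finset _).symm
    _ ≤ _ := Set.ncard_le_ncard hsubF hfin

theorem dfsInv_step (N : Int) (edges : List (Int × Int)) (K : Int) (s : Int)
    (hPre : ∀ e ∈ edges, 1 - N ≤ e.1 ∧ e.1 ≤ N ∧ 1 - N ≤ e.2 ∧ e.2 ≤ N)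
    (seen : List Int) (a : Int) (rest : List Int)
    (inv : DfsInv N edges K s seen (a :: rest)) (hK : ¬ PySem.Set.len seen > K) :
    DfsInv N edges K s
      (seen ++ newElems seen ((PySem.List.pyGet? (buildAdj N edges) ((a :: rest).getLast (List.cons_ne_nil a rest))).getD []))
      ((a :: rest).dropLast ++ newElems seen ((PySem.List.pyGet? (buildAdj N edges) ((a :: rest).getLast (List.cons_ne_nil a rest))).getD [])) := by
  set u := (a :: rest).getLast (List.cons_ne_nil a rest) with hu
  set stack' := (a :: rest).dropLast with hstack'
  set nbrs := (PySem.List.pyGet? (buildAdj N edges) u).getD [] with hnbrs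
  set nl := newElems seen nbrs with hnl
  have hsplit : stack' ++ [u] = a :: rest := List.dropLast_concat_getLast (List.cons_ne_nil a rest)
  have huSeen : u ∈ seen := inv.sub u (List.getLast_mem _)
  have huRng := inv.rng u huSeen
  have hnbrStep : ∀ y, y ∈ nbrs ↔ StepR N edges u y := by
    intro y
    exact mem_buildAdj N edges u y huRng.1 huRng.2
  have hnlSub : ∀ x ∈ nl, x ∈ nbrs ∧ x ∉ seen := fun x hx => newElems_sub nbrs seen x hx
  have huStack' : u ∉ stack' := by
    have hnd : (stack' ++ [u]).Nodup := by rw [hsplit]; exact inv.ndStack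
    rcases List.nodup_append.mp hnd with ⟨_, _, hdis⟩
    intro hmem
    exact hdis u hmem u (List.mem_singleton_self u) rfl
  have hsub' : ∀ x ∈ stack', x ∈ seen := by
    intro x hx
    refine inv.sub x ?_
    rw [← hsplit]; exact List.mem_append_left _ hx
  refine ⟨newElems_app_nodup nbrs seen inv.ndSeen, ?_, ?_, ?_, ?_, ?_, ?_, ?_⟩
  · -- stack nodup
    rw [List.nodup_append]
    refine ⟨?_, newElems_nodup nbrs seen, ?_⟩
    · have hnd : (stack' ++ [u]).Nodup := by rw [hsplit]; exact inv.ndStack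
      exact (List.nodup_append.mp hnd).1
    · intro x hx y hy hxy
      subst hxy
      exact (hnlSub x hy).2 (hsub' x hx)
  · -- sub
    intro x hx
    rcases List.mem_append.mp hx with hx | hx
    · exact List.mem_append_left _ (hsub' x hx)
    · exact List.mem_append_right _ hx
  · -- rng
    intro x hx
    rcases List.mem_append.mp hx with hx | hx
    · exact inv.rng x hx
    · rcases (hnbrStep x).mp (hnlSub x hx).1 with ⟨e, he, hy, _, _⟩
      rcases hPre e he with ⟨h1, h2, _, _⟩
      omega
  · -- snd
    intro x hx
    rcases List.mem_append.mp hx with hx | hx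
    · exact inv.snd x hx
    · have hstep := (hnbrStep x).mp (hnlSub x hx).1
      exact Relation.ReflTransGen.tail (inv.snd u huSeen) hstep
  · -- closed
    intro x hx hxs y hstep
    rcases List.mem_append.mp hx with hx | hx
    · by_cases hxu : x = u
      · subst hxu
        exact newElems_cover nbrs seen y ((hnbrStep y).mpr hstep)
      · have hxStack : x ∉ a :: rest := by
          rw [← hsplit]
          intro hmem
          rcases List.mem_append.mp hmem with h | h
          · exact hxs (List.mem_append_left _ h)
          · exact hxu (List.mem_singleton.mp h)
        exact List.mem_append_left _ (inv.closed x hx hxStack y hstep)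
    · exact absurd (List.mem_append_right stack' hx) hxs
  · -- start
    exact List.mem_append_left _ inv.start
  · -- emptyB
    intro hempty
    rcases List.append_eq_nil_iff.mp hempty with ⟨_, hnl0⟩
    rw [hnl0, List.append_nil]
    simp only [PySem.Set.len, gt_iff_lt, not_lt] at hK
    exact hK

theorem dfs_nil (N : Int) (edges : List (Int × Int)) (K : Int) (s : Int)
    (seen : List Int) (inv : DfsInv N edges K s seen []) :
    ((dfsLoop (buildAdj N edges) K seen [] = true) ↔ K < ((ClR N edges s).ncard : Int)) := by
  rw [dfsLoop]
  simp only [Bool.false_eq_true, false_iff, not_lt]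
  have hcl : ClR N edges s = ↑seen.toFinset := by
    ext x
    simp only [Finset.mem_coe, List.mem_toFinset]
    constructor
    · intro hx
      induction hx with
      | refl => exact inv.start
      | tail _ hstep ih => exact inv.closed _ ih (by simp) _ hstep
    · exact inv.snd x
  rw [hcl, Set.ncard_coe_finset, List.toFinset_card_of_nodup inv.ndSeen]
  exact inv.emptyB rfl

theorem dfs_main (N : Int) (edges : List (Int × Int)) (K : Int) (s : Int)
    (hPre : ∀ e ∈ edges, 1 - N ≤ e.1 ∧ e.1 ≤ N ∧ 1 - N ≤ e.2 ∧ e.2 ≤ N)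
    (hs0 : -N ≤ s) (hsN : s < N) :
    ∀ (n : Nat) (seen stack : List Int),
    unseen (PySem.List.dedup (buildAdj N edges).flatten) seen * 2 + stack.length ≤ n →
    DfsInv N edges K s seen stack →
    ((dfsLoop (buildAdj N edges) K seen stack = true) ↔ K < ((ClR N edges s).ncard : Int)) := by
  intro n
  induction n with
  | zero =>
    intro seen stack hn inv
    have : stack = [] := List.length_eq_zero_iff.mp (by omega)
    subst this
    exact dfs_nil N edges K s seen inv
  | succ n ih =>
    intro seen stack hn inv
    cases stack with
    | nil =>
      exact dfs_nil N edges K s seen inv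
    | cons a rest =>
      by_cases hK : PySem.Set.len seen > K
      · rw [dfsLoop, if_pos hK]
        simp only [true_iff]
        have hle := seen_len_le_ncard N edges s seen (clR_finite N edges hPre s hs0 hsN)
          inv.ndSeen inv.snd
        simp only [PySem.Set.len, gt_iff_lt] at hK
        omega
      · have hred : dfsLoop (buildAdj N edges) K seen (a :: rest) =
            dfsLoop (buildAdj N edges) K
              (seen ++ newElems seen ((PySem.List.pyGet? (buildAdj N edges) ((a :: rest).getLast (List.cons_ne_nil a rest))).getD []))
              ((a :: rest).dropLast ++ newElems seen ((PySem.List.pyGet? (buildAdj N edges) ((a :: rest).getLast (List.cons_ne_nil a rest))).getD [])) := by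
          conv_lhs => rw [dfsLoop]
          rw [if_neg hK]
          show dfsLoop (buildAdj N edges) K
            ((((PySem.List.pyGet? (buildAdj N edges) ((a :: rest).getLast (List.cons_ne_nil a rest))).getD []).foldl
              (fun (p : PySem.Set Int × List Int) v =>
                if PySem.Set.contains p.1 v then p else (PySem.Set.add p.1 v, p.2 ++ [v]))
              (seen, (a :: rest).dropLast)).1)
            ((((PySem.List.pyGet? (buildAdj N edges) ((a :: rest).getLast (List.cons_ne_nil a rest))).getD []).foldl
              (fun (p : PySem.Set Int × List Int) v =>
                if PySem.Set.contains p.1 v then p else (PySem.Set.add p.1 v, p.2 ++ [v]))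
              (seen, (a :: rest).dropLast)).2) = _
          rw [dfsPush_eq]
        rw [hred]
        have hinv' := dfsInv_step N edges K s hPre seen a rest inv hK
        have hD : (PySem.List.dedup (buildAdj N edges).flatten).Nodup := PySem.List.nodup_dedup _
        have hsubD : ∀ x ∈ newElems seen ((PySem.List.pyGet? (buildAdj N edges) ((a :: rest).getLast (List.cons_ne_nil a rest))).getD []),
            x ∈ PySem.List.dedup (buildAdj N edges).flatten ∧ x ∉ seen := by
          intro x hx
          rcases newElems_sub _ seen x hx with ⟨h1, h2⟩
          refine ⟨?_, h2⟩
          have : x ∈ (buildAdj N edges).flatten := by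
            cases hg : PySem.List.pyGet? (buildAdj N edges) ((a :: rest).getLast (List.cons_ne_nil a rest)) with
            | none => rw [hg] at h1; simp at h1
            | some l =>
              rw [hg] at h1; simp at h1
              exact List.mem_flatten.mpr ⟨l, PySem.List.mem_of_pyGet?_eq_some _ hg, h1⟩
          simpa [PySem.List.mem_dedup] using this
        have hspl := unseen_split (PySem.List.dedup (buildAdj N edges).flatten) seen
          (newElems seen _) hD (newElems_nodup _ seen) hsubD
        refine ih _ _ ?_ hinv'
        simp only [List.length_cons] at hn
        simp only [List.length_append, List.length_dropLast, List.length_cons]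
        omega

theorem dfsLoop_iff (N K : Int) (edges : List (Int × Int))
    (hPre : ∀ e ∈ edges, 1 - N ≤ e.1 ∧ e.1 ≤ N ∧ 1 - N ≤ e.2 ∧ e.2 ≤ N)
    (s : Int) (hs0 : 0 ≤ s) (hsN : s < N) :
    (dfsLoop (buildAdj N edges) K (PySem.Set.ofList [s]) [s] = true)
      ↔ K < ((ClR N edges s).ncard : Int) := by
  have hofl : PySem.Set.ofList [s] = [s] := rfl
  rw [hofl]
  refine dfs_main N edges K s hPre (by omega) hsN
    (unseen (PySem.List.dedup (buildAdj N edges).flatten) [s] * 2 + 1) [s] [s] (by simp) ?_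
  refine ⟨List.nodup_singleton s, List.nodup_singleton s, fun x hx => hx, ?_, ?_, ?_, List.mem_singleton_self s, ?_⟩
  · intro x hx
    rw [List.mem_singleton] at hx; subst hx
    exact ⟨by omega, hsN⟩
  · intro x hx
    rw [List.mem_singleton] at hx; subst hx
    exact Relation.ReflTransGen.refl
  · intro x hx hx'
    rw [List.mem_singleton] at hx; subst hx
    exact absurd (List.mem_singleton_self x) hx'
  · intro h; cases h

-- ---------- B side: the relaxation rounds compute the transitive reverse-reachability ----------

def entryL (p : List (PySem.Set Int)) (j : Nat) : PySem.Set Int := p.getD j []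

theorem length_altUpd (p : List (PySem.Set Int)) (e : Int × Int) :
    (altUpd p e).length = p.length := by
  unfold altUpd
  cases PySem.List.pyGet? p (e.1 - 1) with
  | none => rfl
  | some ru =>
    cases PySem.List.pyIdx? p.length (e.2 - 1) with
    | none => rfl
    | some j => exact List.length_set ..

theorem altUpd_eq_set (p : List (PySem.Set Int)) (e : Int × Int) (ru : PySem.Set Int) (j : Nat)
    (h1 : PySem.List.pyGet? p (e.1 - 1) = some ru)
    (h2 : PySem.List.pyIdx? p.length (e.2 - 1) = some j) :
    altUpd p e = p.set j (PySem.Set.union (p.getD j []) (PySem.Set.union ru (PySem.Set.ofList [e.1 - 1]))) := by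
  unfold altUpd
  rw [h1, h2]

theorem entryL_set_self (p : List (PySem.Set Int)) (j : Nat) (v : PySem.Set Int) (hj : j < p.length) :
    entryL (p.set j v) j = v := by
  unfold entryL
  rw [List.getD_eq_getElem?_getD, List.getElem?_set_self (by omega), Option.getD_some]

theorem entryL_set_ne (p : List (PySem.Set Int)) (j j' : Nat) (v : PySem.Set Int) (hj : j ≠ j') :
    entryL (p.set j v) j' = entryL p j' := by
  unfold entryL
  rw [List.getD_eq_getElem?_getD, List.getElem?_set_ne hj, ← List.getD_eq_getElem?_getD]

theorem mem_entryL_altUpd (p : List (PySem.Set Int)) (e : Int × Int) (j : Nat) (x : Int)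
    (hx : x ∈ entryL p j) : x ∈ entryL (altUpd p e) j := by
  cases h1 : PySem.List.pyGet? p (e.1 - 1) with
  | none => unfold altUpd; rw [h1]; exact hx
  | some ru =>
    cases h2 : PySem.List.pyIdx? p.length (e.2 - 1) with
    | none => unfold altUpd; rw [h1, h2]; exact hx
    | some j2 =>
      rw [altUpd_eq_set p e ru j2 h1 h2]
      by_cases hj : j2 = j
      · subst hj
        rw [entryL_set_self p j2 _ (pyIdx?_lt _ _ _ h2)]
        refine (PySem.Set.mem_union _ _ _).mpr (Or.inl ?_)
        exact hx
      · rw [entryL_set_ne p j2 j _ hj]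
        exact hx

theorem nodup_entryL_altUpd (p : List (PySem.Set Int)) (e : Int × Int)
    (h : ∀ j, (entryL p j).Nodup) : ∀ j, (entryL (altUpd p e) j).Nodup := by
  intro j
  cases h1 : PySem.List.pyGet? p (e.1 - 1) with
  | none => unfold altUpd; rw [h1]; exact h j
  | some ru =>
    cases h2 : PySem.List.pyIdx? p.length (e.2 - 1) with
    | none => unfold altUpd; rw [h1, h2]; exact h j
    | some j2 =>
      rw [altUpd_eq_set p e ru j2 h1 h2]
      by_cases hj : j2 = j
      · subst hj
        rw [entryL_set_self p j2 _ (pyIdx?_lt _ _ _ h2)]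
        exact PySem.Set.nodup_union _ _ (h j2)
      · rw [entryL_set_ne p j2 j _ hj]
        exact h j

theorem length_foldlAlt : ∀ (es : List (Int × Int)) (p : List (PySem.Set Int)),
    (es.foldl altUpd p).length = p.length := by
  intro es
  induction es with
  | nil => intro p; rfl
  | cons e es ih => intro p; rw [List.foldl_cons, ih, length_altUpd]

theorem mono_foldlAlt : ∀ (es : List (Int × Int)) (p : List (PySem.Set Int)) (j : Nat) (x : Int),
    x ∈ entryL p j → x ∈ entryL (es.foldl altUpd p) j := by
  intro es
  induction es with
  | nil => intro p j x hx; exact hx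
  | cons e es ih => intro p j x hx; exact ih _ _ _ (mem_entryL_altUpd p e j x hx)

theorem nodup_foldlAlt : ∀ (es : List (Int × Int)) (p : List (PySem.Set Int)),
    (∀ j, (entryL p j).Nodup) → ∀ j, (entryL (es.foldl altUpd p) j).Nodup := by
  intro es
  induction es with
  | nil => intro p h; exact h
  | cons e es ih => intro p h; exact ih _ (nodup_entryL_altUpd p e h)

theorem pyGet?_of_pyIdx? (p : List (PySem.Set Int)) (i : Int) (j : Nat)
    (h : PySem.List.pyIdx? p.length i = some j) :
    PySem.List.pyGet? p i = some (entryL p j) := by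
  have hj := pyIdx?_lt _ _ _ h
  unfold PySem.List.pyGet?
  rw [h, Option.bind_some, List.getElem?_eq_getElem (by omega)]
  unfold entryL
  rw [List.getD_eq_getElem?_getD, List.getElem?_eq_getElem (by omega), Option.getD_some]

theorem edge_foldlAlt : ∀ (es : List (Int × Int)) (p : List (PySem.Set Int))
    (e : Int × Int) (j1 j2 : Nat) (x : Int),
    e ∈ es → PySem.List.pyIdx? p.length (e.1 - 1) = some j1 →
    PySem.List.pyIdx? p.length (e.2 - 1) = some j2 →
    (x = e.1 - 1 ∨ x ∈ entryL p j1) → x ∈ entryL (es.foldl altUpd p) j2 := by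
  intro es
  induction es with
  | nil => intro p e j1 j2 x he; cases he
  | cons e0 es ih =>
    intro p e j1 j2 x he h1 h2 hx
    rcases List.mem_cons.mp he with rfl | he
    · rw [List.foldl_cons]
      refine mono_foldlAlt es _ _ _ ?_
      rw [altUpd_eq_set p e (entryL p j1) j2 (pyGet?_of_pyIdx? p _ j1 h1) h2]
      rw [entryL_set_self p j2 _ (pyIdx?_lt _ _ _ h2)]
      refine (PySem.Set.mem_union _ _ _).mpr (Or.inr ?_)
      rcases hx with rfl | hx
      · refine (PySem.Set.mem_union _ _ _).mpr (Or.inr ?_)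
        exact (PySem.Set.mem_ofList _ _).mpr (List.mem_singleton_self _)
      · exact (PySem.Set.mem_union _ _ _).mpr (Or.inl hx)
    · rw [List.foldl_cons]
      have hlen : (altUpd p e0).length = p.length := length_altUpd p e0
      refine ih (altUpd p e0) e j1 j2 x he (by rw [hlen]; exact h1) (by rw [hlen]; exact h2) ?_
      rcases hx with rfl | hx
      · exact Or.inl rfl
      · exact Or.inr (mem_entryL_altUpd p e0 j1 x hx)

theorem sound_foldlAlt (N : Int) (edges : List (Int × Int)) :
    ∀ (es : List (Int × Int)) (p : List (PySem.Set Int)),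
    (∀ e ∈ es, e ∈ edges) → p.length = N.toNat →
    (∀ (j : Nat) (x : Int), x ∈ entryL p j → Relation.TransGen (StepR N edges) (j : Int) x) →
    ∀ (j : Nat) (x : Int), x ∈ entryL (es.foldl altUpd p) j →
      Relation.TransGen (StepR N edges) (j : Int) x := by
  intro es
  induction es with
  | nil => intro p _ _ h j x hx; exact h j x hx
  | cons e es ih =>
    intro p hsub hlen h j x hx
    rw [List.foldl_cons] at hx
    refine ih (altUpd p e) (fun e' he' => hsub e' (List.mem_cons_of_mem _ he'))
      (by rw [length_altUpd]; exact hlen) ?_ j x hx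
    intro j' x' hx'
    cases h1 : PySem.List.pyGet? p (e.1 - 1) with
    | none => unfold altUpd at hx'; rw [h1] at hx'; exact h j' x' hx'
    | some ru =>
      cases h2 : PySem.List.pyIdx? p.length (e.2 - 1) with
      | none => unfold altUpd at hx'; rw [h1, h2] at hx'; exact h j' x' hx'
      | some j2 =>
        rw [altUpd_eq_set p e ru j2 h1 h2] at hx'
        by_cases hj : j2 = j'
        · subst hj
          rw [entryL_set_self p j2 _ (pyIdx?_lt _ _ _ h2)] at hx'
          -- the class of e.1 - 1
          obtain ⟨j1, hj1⟩ : ∃ j1 : Nat, PySem.List.pyIdx? p.length (e.1 - 1) = some j1 := by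
            unfold PySem.List.pyGet? at h1
            cases hidx : PySem.List.pyIdx? p.length (e.1 - 1) with
            | none => rw [hidx] at h1; cases h1
            | some j1 => exact ⟨j1, rfl⟩
          have hru : ru = entryL p j1 := by
            have h := pyGet?_of_pyIdx? p (e.1 - 1) j1 hj1
            rw [h1] at h
            exact Option.some_inj.mp h
          have h2N : PySem.List.pyIdx? N.toNat (e.2 - 1) = some j2 := by
            rw [← hlen]; exact h2
          have hj1N : PySem.List.pyIdx? N.toNat (e.1 - 1) = some j1 := by
            rw [← hlen]; exact hj1
          have hstep : StepR N edges (j2 : Int) (e.1 - 1) := by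
            refine ⟨e, hsub e List.mem_cons_self, rfl, ?_, ?_⟩
            · rw [h2N]; rfl
            · rw [h2N, pyIdx?_canon N.toNat j2 (by rw [← hlen]; exact pyIdx?_lt _ _ _ h2)]
          rcases (PySem.Set.mem_union _ _ _).mp hx' with hold | hnew
          · exact h j2 x' hold
          · rcases (PySem.Set.mem_union _ _ _).mp hnew with hru' | hself
            · -- x' came from the source entry: one step to e.1-1, then onward
              rw [hru] at hru'
              have htg : Relation.TransGen (StepR N edges) ((j1 : Nat) : Int) x' := h j1 x' hru'
              have hclass : ∀ z, StepR N edges ((j1 : Nat) : Int) z → StepR N edges (e.1 - 1) z := by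
                intro z hz
                refine stepR_congr N edges _ _ _ ?_ hz
                rw [pyIdx?_canon N.toNat j1 (by rw [← hlen]; exact pyIdx?_lt _ _ _ hj1), hj1N]
              exact Relation.TransGen.head hstep (transGen_shift hclass htg)
            · have : x' = e.1 - 1 := by
                have := (PySem.Set.mem_ofList _ _).mp hself
                simpa using this
              subst this
              exact Relation.TransGen.single hstep
        · rw [entryL_set_ne p j2 j' _ hj] at hx'
          exact h j' x' hx'

-- the rounds, as an iterate indexed by the round count
def iterPassL (edges : List (Int × Int)) : Nat → List (PySem.Set Int) → List (PySem.Set Int)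
  | 0, p => p
  | (k+1), p => edges.foldl altUpd (iterPassL edges k p)

theorem iterPassL_comm (edges : List (Int × Int)) : ∀ (k : Nat) (p : List (PySem.Set Int)),
    iterPassL edges k (edges.foldl altUpd p) = iterPassL edges (k+1) p := by
  intro k
  induction k with
  | zero => intro p; rfl
  | succ k ih =>
    intro p
    show edges.foldl altUpd (iterPassL edges k (edges.foldl altUpd p)) = _
    rw [ih p]; rfl

theorem foldl_rounds_eq_iterL (edges : List (Int × Int)) : ∀ (l : List Int) (p : List (PySem.Set Int)),
    l.foldl (fun p _ => edges.foldl altUpd p) p = iterPassL edges l.length p := by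
  intro l
  induction l with
  | nil => intro p; rfl
  | cons a l ih =>
    intro p
    rw [List.foldl_cons, ih, iterPassL_comm]
    rfl

theorem length_iterPassL (edges : List (Int × Int)) : ∀ (k : Nat) (p : List (PySem.Set Int)),
    (iterPassL edges k p).length = p.length := by
  intro k
  induction k with
  | zero => intro p; rfl
  | succ k ih => intro p; show (edges.foldl altUpd _).length = _; rw [length_foldlAlt, ih]

theorem mono_iterPassL_le (edges : List (Int × Int)) : ∀ (k m : Nat), k ≤ m →
    ∀ (p : List (PySem.Set Int)) (j : Nat) (x : Int),
    x ∈ entryL (iterPassL edges k p) j → x ∈ entryL (iterPassL edges m p) j := by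
  intro k m hkm
  induction m with
  | zero => intro p j x hx; have : k = 0 := by omega
            subst this; exact hx
  | succ m ih =>
    intro p j x hx
    rcases Nat.lt_or_ge k (m+1) with hlt | hge
    · have : x ∈ entryL (iterPassL edges m p) j := ih (by omega) p j x hx
      exact mono_foldlAlt edges _ j x this
    · have : k = m + 1 := by omega
      subst this; exact hx

-- the initial list of empty sets
theorem length_initL (N : Int) : ((PySem.List.pyRange 0 N 1).map (fun _ => (PySem.Set.empty : PySem.Set Int))).length = N.toNat := by
  simp [PySem.List.length_pyRange_one]

theorem entryL_initL (N : Int) (j : Nat) :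
    entryL ((PySem.List.pyRange 0 N 1).map (fun _ => (PySem.Set.empty : PySem.Set Int))) j = [] := by
  unfold entryL
  rw [List.getD_eq_getElem?_getD, List.getElem?_map]
  cases (PySem.List.pyRange 0 N 1)[j]? <;> simp [PySem.Set.empty]

-- simple paths
inductive PathL (r : Int → Int → Prop) : Int → List Int → Int → Prop
  | nil (a : Int) : PathL r a [] a
  | cons {a b c : Int} {l : List Int} : r a b → PathL r b l c → PathL r a (b :: l) c

theorem pathL_append {r : Int → Int → Prop} :
    ∀ {a b c : Int} {l : List Int}, PathL r a l b → r b c → PathL r a (l ++ [c]) c := by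
  intro a b c l h
  induction h with
  | nil a => intro h'; exact PathL.cons h' (PathL.nil c)
  | cons hr _ ih => intro h'; exact PathL.cons hr (ih h')

theorem path_of_transGen {r : Int → Int → Prop} {a c : Int}
    (h : Relation.TransGen r a c) : ∃ l, l ≠ [] ∧ PathL r a l c := by
  induction h with
  | single h => exact ⟨[_], by simp, PathL.cons h (PathL.nil _)⟩
  | tail _ hstep ih =>
    rcases ih with ⟨l, _, hl⟩
    exact ⟨l ++ [_], by simp, pathL_append hl hstep⟩

theorem path_suffix {r : Int → Int → Prop} :
    ∀ (l1 : List Int) {a b c : Int} {l2 : List Int},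
    PathL r a (l1 ++ b :: l2) c → PathL r b l2 c := by
  intro l1
  induction l1 with
  | nil =>
    intro a b c l2 h
    cases h with
    | cons _ h2 => exact h2
  | cons x t ih =>
    intro a b c l2 h
    cases h with
    | cons _ h2 => exact ih h2

theorem mem_dropLast_split {b : Int} : ∀ {l : List Int}, b ∈ l.dropLast →
    ∃ l1 l2, l = l1 ++ b :: l2 ∧ l2 ≠ [] := by
  intro l hb
  have hlne : l ≠ [] := by
    intro h; subst h; simp at hb
  rcases List.append_of_mem hb with ⟨s, t, hst⟩
  refine ⟨s, t ++ [l.getLast hlne], ?_, by simp⟩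
  conv_lhs => rw [← List.dropLast_concat_getLast hlne]
  rw [hst]
  simp

theorem path_shorten2 {r : Int → Int → Prop} {c : Int → Option Nat}
    (hshift : ∀ z w y, c z = c w → r z y → r w y) :
    ∀ (n : Nat) (l : List Int) (a x : Int), l.length ≤ n → PathL r a l x →
    ∃ l', PathL r a l' x ∧ l'.length ≤ l.length ∧ ((a :: l'.dropLast).map c).Nodup ∧
      (∀ y ∈ l'.dropLast, y ∈ l.dropLast) ∧ (l ≠ [] → l' ≠ []) := by
  intro n
  induction n with
  | zero =>
    intro l a x hlen h
    have : l = [] := List.length_eq_zero_iff.mp (by omega)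
    subst this
    exact ⟨[], h, by simp, by simp, by simp, by simp⟩
  | succ n ih =>
    intro l a x hlen h
    by_cases hdup : ∃ b ∈ l.dropLast, c b = c a
    · rcases hdup with ⟨b, hb, hcb⟩
      rcases mem_dropLast_split hb with ⟨l1, l2, rfl, hl2⟩
      have hsuf : PathL r b l2 x := path_suffix l1 h
      cases hl2e : l2 with
      | nil => exact absurd hl2e hl2
      | cons h2 t2 =>
        subst hl2e
        have hpa : PathL r a (h2 :: t2) x := by
          cases hsuf with
          | cons hr hp => exact PathL.cons (hshift b a h2 hcb hr) hp
        have hlen2 : (h2 :: t2).length ≤ n := by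
          simp only [List.length_append, List.length_cons] at hlen ⊢
          omega
        rcases ih (h2 :: t2) a x hlen2 hpa with ⟨l', hp', hle', hnd', hsub', hne'⟩
        have hdl : (l1 ++ b :: h2 :: t2).dropLast = l1 ++ b :: (h2 :: t2).dropLast := by
          rw [List.dropLast_append_cons]
          rw [List.dropLast_cons_of_ne_nil (by simp : (h2 :: t2) ≠ [])]
        refine ⟨l', hp', ?_, hnd', ?_, ?_⟩
        · simp only [List.length_append, List.length_cons] at hle' ⊢
          omega
        · intro y hy
          rw [hdl]
          have := hsub' y hy
          exact List.mem_append_right _ (List.mem_cons_of_mem _ this)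
        · intro _
          exact hne' (by simp)
    · cases l with
      | nil => exact ⟨[], h, by simp, by simp, by simp, by simp⟩
      | cons b t =>
        cases h with
        | cons hr hp =>
          cases t with
          | nil =>
            cases hp
            exact ⟨[x], PathL.cons hr (PathL.nil x), by simp, by simp, by simp, by simp⟩
          | cons h2 t2 =>
            have hlen2 : (h2 :: t2).length ≤ n := by
              simp only [List.length_cons] at hlen ⊢
              omega
            rcases ih (h2 :: t2) b x hlen2 hp with ⟨t', hp', hle', hnd', hsub', hne'⟩
            have ht'ne : t' ≠ [] := hne' (by simp)
            have hbdrop : b ∈ (b :: h2 :: t2).dropLast := by simp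
            have hdl1 : (h2 :: t2).dropLast ⊆ (b :: h2 :: t2).dropLast := by
              intro y hy
              simp only [List.dropLast_cons_of_ne_nil (by simp : (h2 :: t2) ≠ [])] at *
              exact List.mem_cons_of_mem _ hy
            refine ⟨b :: t', PathL.cons hr hp', ?_, ?_, ?_, by simp⟩
            · simp only [List.length_cons] at hle' ⊢
              omega
            · -- class-nodup of sources
              have hbt : (b :: t').dropLast = b :: t'.dropLast :=
                List.dropLast_cons_of_ne_nil ht'ne
              rw [hbt]
              simp only [List.map_cons, List.nodup_cons] at hnd' ⊢
              refine ⟨?_, hnd'⟩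
              intro hmem
              simp only [List.mem_cons, List.mem_map] at hmem
              rcases hmem with hab | ⟨y, hy, hcy⟩
              · exact hdup ⟨b, hbdrop, hab.symm⟩
              · exact hdup ⟨y, hdl1 (hsub' y hy), hcy⟩
            · intro y hy
              rw [List.dropLast_cons_of_ne_nil ht'ne] at hy
              rcases List.mem_cons.mp hy with rfl | hy
              · exact hbdrop
              · exact hdl1 (hsub' y hy)

theorem sources_length_le {c : Int → Option Nat} (n : Nat) :
    ∀ (L : List Int), (L.map c).Nodup → (∀ y ∈ L, ∃ j, j < n ∧ c y = some j) →
    L.length ≤ n := by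
  intro L hnd hval
  have hsub : (L.map c).toFinset ⊆ (Finset.range n).image some := by
    intro o ho
    rw [List.mem_toFinset] at ho
    rcases List.mem_map.mp ho with ⟨y, hy, rfl⟩
    rcases hval y hy with ⟨j, hj, hcy⟩
    rw [hcy]
    exact Finset.mem_image.mpr ⟨j, Finset.mem_range.mpr hj, rfl⟩
  have h1 : (L.map c).toFinset.card = (L.map c).length := List.toFinset_card_of_nodup hnd
  have h2 := Finset.card_le_card hsub
  have h3 : ((Finset.range n).image some).card ≤ n := le_trans Finset.card_image_le (by simp)
  rw [List.length_map] at h1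
  omega

theorem stepR_target_class (N : Int) (edges : List (Int × Int))
    (hPre : ∀ e ∈ edges, 1 - N ≤ e.1 ∧ e.1 ≤ N ∧ 1 - N ≤ e.2 ∧ e.2 ≤ N)
    {z y : Int} (h : StepR N edges z y) :
    ∃ j : Nat, j < N.toNat ∧ PySem.List.pyIdx? N.toNat y = some j := by
  rcases h with ⟨e, he, rfl, hs, _⟩
  rcases hPre e he with ⟨h1, h2, _, _⟩
  have hN : 1 ≤ N := by
    by_contra hN
    have : N.toNat = 0 := by omega
    rw [this] at hs
    unfold PySem.List.pyIdx? at hs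
    by_cases h0 : (0:Int) ≤ e.2 - 1
    · rw [if_pos h0, if_neg (by omega)] at hs; simp at hs
    · rw [if_neg h0, if_neg (by omega)] at hs; simp at hs
  obtain ⟨j, hj⟩ := pyIdx?_some_of N.toNat (e.1 - 1) (by omega) (by omega)
  exact ⟨j, pyIdx?_lt _ _ _ hj, hj⟩

theorem complete_iterPassL (N : Int) (edges : List (Int × Int))
    (hPre : ∀ e ∈ edges, 1 - N ≤ e.1 ∧ e.1 ≤ N ∧ 1 - N ≤ e.2 ∧ e.2 ≤ N) :
    ∀ (l : List Int) (a x : Int), PathL (StepR N edges) a l x → l ≠ [] →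
    ∀ j : Nat, PySem.List.pyIdx? N.toNat a = some j →
    x ∈ entryL (iterPassL edges l.length ((PySem.List.pyRange 0 N 1).map (fun _ => PySem.Set.empty))) j := by
  intro l a x hpath
  induction hpath with
  | nil a => intro hne; exact absurd rfl hne
  | @cons a' b x' l' hr hp ih =>
    intro _ j hj
    set init := (PySem.List.pyRange 0 N 1).map (fun _ => (PySem.Set.empty : PySem.Set Int)) with hinit
    rcases hr with ⟨e, he, hb, hs, heq⟩
    have hlenInit := length_initL N
    have hiterLen : (iterPassL edges l'.length init).length = N.toNat := by
      rw [length_iterPassL, hlenInit]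
    have hj2 : PySem.List.pyIdx? N.toNat (e.2 - 1) = some j := by rw [heq, hj]
    rcases hPre e he with ⟨h1, h2, _, _⟩
    have hN : 1 ≤ N := by
      have := pyIdx?_lt _ _ _ hj2
      omega
    obtain ⟨j1, hj1⟩ := pyIdx?_some_of N.toNat (e.1 - 1) (by omega) (by omega)
    show x' ∈ entryL (iterPassL edges (l'.length + 1) init) j
    have hpass : iterPassL edges (l'.length + 1) init = edges.foldl altUpd (iterPassL edges l'.length init) := rfl
    rw [hpass]
    refine edge_foldlAlt edges _ e j1 j x' he (by rw [hiterLen]; exact hj1) (by rw [hiterLen]; exact hj2) ?_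
    cases hl'e : l' with
    | nil =>
      subst hl'e
      cases hp
      exact Or.inl hb
    | cons h2 t2 =>
      subst hl'e
      refine Or.inr ?_
      have hb1 : PySem.List.pyIdx? N.toNat b = some j1 := by rw [hb]; exact hj1
      exact ih (by simp) j1 hb1

theorem final_charL (N : Int) (edges : List (Int × Int))
    (hPre : ∀ e ∈ edges, 1 - N ≤ e.1 ∧ e.1 ≤ N ∧ 1 - N ≤ e.2 ∧ e.2 ≤ N)
    (i : Int) (h0 : 0 ≤ i) (hN : i < N) (x : Int) :
    x ∈ entryL (iterPassL edges N.toNat ((PySem.List.pyRange 0 N 1).map (fun _ => PySem.Set.empty))) i.toNat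
      ↔ Relation.TransGen (StepR N edges) i x := by
  set init := (PySem.List.pyRange 0 N 1).map (fun _ => (PySem.Set.empty : PySem.Set Int)) with hinit
  have hcanon : PySem.List.pyIdx? N.toNat i = some i.toNat := by
    unfold PySem.List.pyIdx?
    rw [if_pos (by omega), if_pos (by omega)]
  have hcast : ((i.toNat : Nat) : Int) = i := by omega
  constructor
  · intro hx
    have hsound : ∀ (k : Nat) (j : Nat) (x : Int), x ∈ entryL (iterPassL edges k init) j →
        Relation.TransGen (StepR N edges) (j : Int) x := by
      intro k
      induction k with
      | zero =>
        intro j x hx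
        rw [show iterPassL edges 0 init = init from rfl, entryL_initL] at hx
        cases hx
      | succ k ih =>
        intro j x hx
        have hx' : x ∈ entryL (edges.foldl altUpd (iterPassL edges k init)) j := hx
        exact sound_foldlAlt N edges edges (iterPassL edges k init) (fun e he => he)
          (by rw [length_iterPassL]; exact length_initL N) ih j x hx'
    have := hsound N.toNat i.toNat x hx
    rwa [hcast] at this
  · intro hx
    rcases path_of_transGen hx with ⟨l, hlne, hl⟩
    have hshift : ∀ z w y, (PySem.List.pyIdx? N.toNat z = PySem.List.pyIdx? N.toNat w) →
        StepR N edges z y → StepR N edges w y := fun z w y hc h => stepR_congr N edges z w y hc h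
    rcases path_shorten2 hshift l.length l i x (le_refl _) hl with ⟨l', hp', hle', hnd', hsub', hne'⟩
    have hl'ne : l' ≠ [] := hne' hlne
    -- every source has a class below N
    have hsources : ∀ y ∈ i :: l'.dropLast, ∃ j, j < N.toNat ∧ PySem.List.pyIdx? N.toNat y = some j := by
      intro y hy
      rcases List.mem_cons.mp hy with rfl | hy
      · refine ⟨y.toNat, by omega, ?_⟩
        unfold PySem.List.pyIdx?
        rw [if_pos (by omega), if_pos (by omega)]
      · -- an interior source was entered by a step
        have : ∀ (a : Int) (l : List Int) (x : Int), PathL (StepR N edges) a l x →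
            ∀ y ∈ l, ∃ z, StepR N edges z y := by
          intro a l x h
          induction h with
          | nil => simp
          | cons hr _ ih =>
            intro y hy
            rcases List.mem_cons.mp hy with rfl | hy
            · exact ⟨_, hr⟩
            · exact ih y hy
        rcases this i l' x hp' y ((List.dropLast_sublist l').subset hy) with ⟨z, hz⟩
        exact stepR_target_class N edges hPre hz
    have hbound : (i :: l'.dropLast).length ≤ N.toNat :=
      sources_length_le N.toNat (i :: l'.dropLast) hnd' hsources
    have hlen' : l'.length ≤ N.toNat := by
      have : l'.dropLast.length = l'.length - 1 := by simp
      simp only [List.length_cons] at hbound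
      have hpos : 0 < l'.length := List.length_pos_iff.mpr hl'ne
      omega
    have hcomp := complete_iterPassL N edges hPre l' i x hp' hl'ne i.toNat hcanon
    exact mono_iterPassL_le edges l'.length N.toNat hlen' init i.toNat x hcomp

theorem final_countL (N : Int) (edges : List (Int × Int))
    (hPre : ∀ e ∈ edges, 1 - N ≤ e.1 ∧ e.1 ≤ N ∧ 1 - N ≤ e.2 ∧ e.2 ≤ N)
    (i : Int) (h0 : 0 ≤ i) (hN : i < N) :
    PySem.Set.len (PySem.Set.union
        ((PySem.List.pyGet? (iterPassL edges N.toNat ((PySem.List.pyRange 0 N 1).map (fun _ => PySem.Set.empty))) i).getD [])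
        (PySem.Set.ofList [i]))
      = ((ClR N edges i).ncard : Int) := by
  set F := iterPassL edges N.toNat ((PySem.List.pyRange 0 N 1).map (fun _ => (PySem.Set.empty : PySem.Set Int))) with hF
  have hFlen : F.length = N.toNat := by rw [hF, length_iterPassL]; exact length_initL N
  have hcanon : PySem.List.pyIdx? F.length i = some i.toNat := by
    rw [hFlen]
    have := pyIdx?_canon N.toNat i.toNat (by omega)
    rwa [show ((i.toNat : Nat) : Int) = i by omega] at this
  have hget : PySem.List.pyGet? F i = some (entryL F i.toNat) := pyGet?_of_pyIdx? F i i.toNat hcanon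
  rw [hget, Option.getD_some]
  set U := PySem.Set.union (entryL F i.toNat) (PySem.Set.ofList [i]) with hU
  have hndE : (entryL F i.toNat).Nodup := by
    rw [hF]
    have : ∀ (k : Nat) (j : Nat), (entryL (iterPassL edges k ((PySem.List.pyRange 0 N 1).map (fun _ => PySem.Set.empty))) j).Nodup := by
      intro k
      induction k with
      | zero =>
        intro j
        show (entryL ((PySem.List.pyRange 0 N 1).map (fun _ => PySem.Set.empty)) j).Nodup
        rw [entryL_initL]
        exact List.nodup_nil
      | succ k ih => intro j; exact nodup_foldlAlt edges _ ih j
    exact this N.toNat i.toNat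
  have hndU : U.Nodup := PySem.Set.nodup_union _ _ hndE
  have hset : ClR N edges i = ↑U.toFinset := by
    ext x
    simp only [Finset.mem_coe, List.mem_toFinset]
    rw [hU]
    constructor
    · intro hx
      rcases Relation.reflTransGen_iff_eq_or_transGen.mp hx with rfl | htg
      · exact (PySem.Set.mem_union _ _ _).mpr (Or.inr ((PySem.Set.mem_ofList _ _).mpr (List.mem_singleton_self _)))
      · exact (PySem.Set.mem_union _ _ _).mpr (Or.inl ((final_charL N edges hPre i h0 hN x).mpr htg))
    · intro hx
      rcases (PySem.Set.mem_union _ _ _).mp hx with hx | hx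
      · exact ((final_charL N edges hPre i h0 hN x).mp hx).to_reflTransGen
      · have : x = i := by simpa using (PySem.Set.mem_ofList _ _).mp hx
        subst this
        exact Relation.ReflTransGen.refl
  rw [hset, Set.ncard_coe_finset, List.toFinset_card_of_nodup hndU]
  rfl

theorem solve_alt_eq_countP (N M K : Int) (edges : List (Int × Int))
    (hPre : ∀ e ∈ edges, 1 - N ≤ e.1 ∧ e.1 ≤ N ∧ 1 - N ≤ e.2 ∧ e.2 ≤ N) :
    solve_alt N M K edges = ((PySem.List.pyRange 0 N 1).countP
      (fun i => decide (K < ((ClR N edges i).ncard : Int))) : Int) := by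
  show (PySem.List.pyRange 0 N 1).foldl
      (fun acc i =>
        if PySem.Set.len (PySem.Set.union
            ((PySem.List.pyGet? ((PySem.List.pyRange 0 N 1).foldl (fun p _ => edges.foldl altUpd p)
              ((PySem.List.pyRange 0 N 1).map (fun _ => PySem.Set.empty))) i).getD [])
            (PySem.Set.ofList [i])) > K
        then acc + 1 else acc) 0 = _
  rw [foldl_rounds_eq_iterL, PySem.List.length_pyRange_one]
  have hNN : ((N : Int) - 0).toNat = N.toNat := by omega
  rw [hNN]
  rw [PySem.List.foldl_ite_add_one (p := fun i => PySem.Set.len (PySem.Set.union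
      ((PySem.List.pyGet? (iterPassL edges N.toNat ((PySem.List.pyRange 0 N 1).map (fun _ => PySem.Set.empty))) i).getD [])
      (PySem.Set.ofList [i])) > K)]
  rw [zero_add]
  congr 1
  apply List.countP_congr
  intro i hi
  rcases PySem.List.mem_pyRange_one.mp hi with ⟨h0, hN⟩
  rw [final_countL N edges hPre i h0 hN]

-- ===== VERDICT (by name: the statement is the Claim_ definition above) =====
theorem solve_spec : Claim_equal_solve := by
  intro N M K edges _hDom hPre
  unfold Spec_solve
  rw [solve_eq_countP, solve_alt_eq_countP N M K edges hPre]
  congr 1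
  apply List.countP_congr
  intro u hu
  rcases PySem.List.mem_pyRange_one.mp hu with ⟨h0, hN⟩
  have h1 := dfsLoop_iff N K edges hPre u h0 hN
  rcases Bool.eq_false_or_eq_true (dfsLoop (buildAdj N edges) K (PySem.Set.ofList [u]) [u]) with hb | hb <;>
    rw [hb] <;> simp only [hb, true_iff] at h1 <;> simp [h1]
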